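-- pv_equiv track=rewrite | github.com/nghiakieu/qltb | backend/switch_db.py | set_url
-- ===== SOURCE A (Python) =====
-- def set_url(content: str, new_url: str) -> str:
--     """Replace the active DATABASE_URL line."""
--     # Comment out any existing DATABASE_URL lines, then add new one
--     lines = content.splitlines()
--     new_lines = []
--     replaced = False
--     for line in lines:
--         if line.startswith("DATABASE_URL="):
--             if not replaced:
--                 new_lines.append(f"DATABASE_URL={new_url}")
--                 replaced = True
--             else:
--                 new_lines.append(f"# {line}")  # comment out duplicates
--         else:
--             new_lines.append(line)
--     if not replaced:
--         new_lines.append(f"DATABASE_URL={new_url}")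
--     return "\n".join(new_lines) + "\n"
-- ===== SOURCE B (Python) =====
-- def set_url(content: str, new_url: str) -> str:
--     """Replace the active DATABASE_URL line."""
--     lines = content.splitlines()
--     try:
--         i = next(k for k, l in enumerate(lines) if l.startswith("DATABASE_URL="))
--     except StopIteration:
--         lines = lines + [f"DATABASE_URL={new_url}"]
--     else:
--         lines = (lines[:i]
--                  + [f"DATABASE_URL={new_url}"]
--                  + [f"# {l}" if l.startswith("DATABASE_URL=") else l
--                     for l in lines[i + 1:]])
--     return "\n".join(lines) + "\n"
-- ===== Notes on version B (the rewrite author's own statement) =====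
-- stated objective: alternative
-- what changed: Instead of one flag-carrying loop that decides per line whether the first match was already replaced, B first locates the index of the first DATABASE_URL line and then rebuilds the result by slicing: untouched prefix, the new line, and a comprehension that comments out matches in the suffix; the no-match case is a plain append.
import Mathlib
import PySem

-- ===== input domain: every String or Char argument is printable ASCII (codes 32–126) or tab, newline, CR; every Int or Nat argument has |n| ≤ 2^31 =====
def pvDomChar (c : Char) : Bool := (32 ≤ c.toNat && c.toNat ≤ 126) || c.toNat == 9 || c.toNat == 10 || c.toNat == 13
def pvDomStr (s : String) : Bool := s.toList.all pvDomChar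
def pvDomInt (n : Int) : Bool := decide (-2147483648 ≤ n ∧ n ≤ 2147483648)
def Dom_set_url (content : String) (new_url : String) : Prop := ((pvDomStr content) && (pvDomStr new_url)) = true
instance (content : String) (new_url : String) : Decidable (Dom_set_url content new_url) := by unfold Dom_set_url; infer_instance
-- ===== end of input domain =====

-- B rebuilds the result from the index of the first DATABASE_URL line by slicing (untouched
-- prefix / new line / suffix with duplicates commented out) instead of A's flag-carrying loop;
-- objective: alternative decomposition, same cost.

-- ===== PORT A =====
-- the for-loop over lines with state (new_lines, replaced), built in order
def setUrlLoopA (new_url : String) : Bool → List String → List String × Bool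
  | replaced, [] => ([], replaced)
  | replaced, l :: ls =>
    if PySem.Str.startswith l "DATABASE_URL=" then
      if !replaced then
        let r := setUrlLoopA new_url true ls
        (("DATABASE_URL=" ++ new_url) :: r.1, r.2)
      else
        let r := setUrlLoopA new_url replaced ls
        (("# " ++ l) :: r.1, r.2)
    else
      let r := setUrlLoopA new_url replaced ls
      (l :: r.1, r.2)

def set_url (content : String) (new_url : String) : String :=
  let lines := PySem.Str.splitlines content
  let r := setUrlLoopA new_url false lines
  let new_lines := if !r.2 then r.1 ++ ["DATABASE_URL=" ++ new_url] else r.1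
  PySem.Str.join "\n" new_lines ++ "\n"

-- ===== PORT B =====
def pvIsUrlLine (l : String) : Bool := PySem.Str.startswith l "DATABASE_URL="

def pvCommentDup (l : String) : String := if pvIsUrlLine l then "# " ++ l else l

def set_url_alt (content : String) (new_url : String) : String :=
  let lines := PySem.Str.splitlines content
  let lines' :=
    match lines.findIdx? pvIsUrlLine with
    | none => lines ++ ["DATABASE_URL=" ++ new_url]
    | some i => lines.take i ++ ["DATABASE_URL=" ++ new_url]
                ++ (lines.drop (i + 1)).map pvCommentDup
  PySem.Str.join "\n" lines' ++ "\n"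

-- ===== PRECONDITION & SPEC =====
def Spec_set_url (content : String) (new_url : String) (out : String) : Prop := out = set_url_alt content new_url
instance (content : String) (new_url : String) (out : String) : Decidable (Spec_set_url content new_url out) := by unfold Spec_set_url; infer_instance

-- ===== CLAIM (what is proved, stated in full; the proofs are below) =====
def Claim_equal_set_url : Prop := ∀ (content : String) (new_url : String), Dom_set_url content new_url → Spec_set_url content new_url (set_url content new_url)

-- ===== LEMMAS AND PROOFS =====
theorem loopA_true (u : String) (ls : List String) :
    setUrlLoopA u true ls = (ls.map pvCommentDup, true) := by
  induction ls with
  | nil => simp [setUrlLoopA]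
  | cons l ls ih =>
    by_cases h : pvIsUrlLine l = true <;>
      simp [setUrlLoopA, pvIsUrlLine, pvCommentDup, ih] at h ⊢ <;> simp [h]

theorem loopA_false (u : String) (ls : List String) :
    (if !(setUrlLoopA u false ls).2 then
        (setUrlLoopA u false ls).1 ++ ["DATABASE_URL=" ++ u]
      else (setUrlLoopA u false ls).1) =
    (match ls.findIdx? pvIsUrlLine with
      | none => ls ++ ["DATABASE_URL=" ++ u]
      | some i => ls.take i ++ ["DATABASE_URL=" ++ u]
                  ++ (ls.drop (i + 1)).map pvCommentDup) := by
  induction ls with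
  | nil => simp [setUrlLoopA]
  | cons l ls ih =>
    rw [List.findIdx?_cons]
    by_cases h : pvIsUrlLine l = true
    · have h' : PySem.Str.startswith l "DATABASE_URL=" = true := h
      simp only [setUrlLoopA, h', Bool.not_false, if_true, loopA_true, h]
      simp
    · have h' : PySem.Str.startswith l "DATABASE_URL=" = false := eq_false_of_ne_true h
      have hb : pvIsUrlLine l = false := eq_false_of_ne_true h
      simp only [setUrlLoopA, h', Bool.false_eq_true, if_false, hb]
      cases hf : ls.findIdx? pvIsUrlLine with
      | none =>
        rw [hf] at ih
        cases hr : (setUrlLoopA u false ls).2 <;> rw [hr] at ih <;> simp at ih ⊢ <;>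
          simp [ih]
      | some i =>
        rw [hf] at ih
        cases hr : (setUrlLoopA u false ls).2 <;> rw [hr] at ih <;> simp at ih ⊢ <;>
          simp [ih]

-- ===== VERDICT (by name: the statement is the Claim_ definition above) =====
theorem set_url_spec : Claim_equal_set_url := by
  intro content new_url _
  exact congrArg (fun l => PySem.Str.join "\n" l ++ "\n")
    (loopA_false new_url (PySem.Str.splitlines content))
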